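-- pv_equiv track=rewrite | github.com/collegekatta/MCA-SEM-II-Lab-Journal | python-programs-source-code/Program-6.py | sum_of_even_numbers
-- ===== SOURCE A (Python) =====
-- def sum_of_even_numbers(n):
--     """Generator function to generate the sum of n even numbers."""
--     count = 0
--     total_sum = 0
--     current_number = 0
--
--     while count < n:
--         current_number += 2  # Increment by 2 to get the next even number
--         total_sum += current_number
--         count += 1
--         yield total_sum
-- ===== SOURCE B (Python) =====
-- def sum_of_even_numbers(n):
--     """Generator: yield running sums of the first n even numbers, each by the closed form k*(k+1)."""
--     k = 0
--     while k < n: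
--         k += 1
--         yield k * (k + 1)
-- ===== Notes on version B (the rewrite author's own statement) =====
-- stated objective: simpler
-- what changed: Replaces the two running accumulators (current even number and running total) with a single counter and the closed form k*(k+1) for each yielded partial sum.
import Mathlib
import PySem

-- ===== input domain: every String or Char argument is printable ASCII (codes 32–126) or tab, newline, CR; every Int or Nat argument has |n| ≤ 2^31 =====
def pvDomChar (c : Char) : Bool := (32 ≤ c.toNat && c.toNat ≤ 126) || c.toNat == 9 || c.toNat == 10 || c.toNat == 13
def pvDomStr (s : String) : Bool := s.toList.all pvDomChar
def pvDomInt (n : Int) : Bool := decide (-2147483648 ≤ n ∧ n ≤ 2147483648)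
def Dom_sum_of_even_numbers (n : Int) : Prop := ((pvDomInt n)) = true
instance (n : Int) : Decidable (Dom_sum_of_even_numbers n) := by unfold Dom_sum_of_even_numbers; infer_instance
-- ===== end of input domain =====

-- ===== PORT A =====
-- while count < n loop, literal state (count, total_sum, current_number)
def pvA_loop (n count total_sum current_number : Int) : List Int :=
  if count < n then
    let current_number' := current_number + 2
    let total_sum' := total_sum + current_number'
    total_sum' :: pvA_loop n (count + 1) total_sum' current_number'
  else []
termination_by (n - count).toNat
decreasing_by omega

def sum_of_even_numbers (n : Int) : List Int := pvA_loop n 0 0 0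

-- ===== PORT B =====
-- B: single counter k, each yielded value is the closed form k*(k+1)
def pvB_loop (n k : Int) : List Int :=
  if k < n then (k + 1) * (k + 2) :: pvB_loop n (k + 1) else []
termination_by (n - k).toNat
decreasing_by omega

def sum_of_even_numbers_alt (n : Int) : List Int := pvB_loop n 0

-- ===== PRECONDITION & SPEC =====
def Spec_sum_of_even_numbers (n : Int) (out : List Int) : Prop := out = sum_of_even_numbers_alt n
instance (n : Int) (out : List Int) : Decidable (Spec_sum_of_even_numbers n out) := by unfold Spec_sum_of_even_numbers; infer_instance

-- ===== CLAIM (what is proved, stated in full; the proofs are below) =====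
def Claim_equal_sum_of_even_numbers : Prop := ∀ (n : Int), Dom_sum_of_even_numbers n → Spec_sum_of_even_numbers n (sum_of_even_numbers n)

-- ===== LEMMAS AND PROOFS =====
lemma loop_eq (n : Int) : ∀ (m : Nat) (c : Int), (n - c).toNat = m →
    pvA_loop n c (c * (c + 1)) (2 * c) = pvB_loop n c := by
  intro m
  induction m with
  | zero =>
    intro c h
    rw [pvA_loop, pvB_loop]
    have : ¬ c < n := by omega
    simp [this]
  | succ m ih =>
    intro c h
    rw [pvA_loop, pvB_loop]
    by_cases hc : c < n
    · simp only [hc, if_pos]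
      have h1 : c * (c + 1) + (2 * c + 2) = (c + 1) * (c + 2) := by ring
      have h2 : (c + 1) * ((c + 1) + 1) = (c + 1) * (c + 2) := by ring
      have h3 : 2 * (c + 1) = 2 * c + 2 := by ring
      have := ih (c + 1) (by omega)
      rw [h2, h3] at this
      simp only [h1, this]
    · simp [hc]

-- ===== VERDICT (by name: the statement is the Claim_ definition above) =====
theorem sum_of_even_numbers_spec : Claim_equal_sum_of_even_numbers := by
  intro n _
  unfold Spec_sum_of_even_numbers sum_of_even_numbers sum_of_even_numbers_alt
  have := loop_eq n (n - 0).toNat 0 rfl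
  simpa using this
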